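-- pv_equiv track=rewrite | github.com/Nick-007/StreamFoundry | function_app/packager.py | _select_trickplay_source
-- ===== SOURCE A (Python) =====
-- from typing import Any, Dict, List, Optional, Iterable
--
-- def _select_trickplay_source(renditions: Iterable[Dict[str, str]]) -> Optional[Dict[str, str]]:
--     best: Optional[Dict[str, str]] = None
--     best_height = -1
--     for rend in renditions or []:
--         label = str(rend.get("name") or "")
--         digits = "".join(ch for ch in label if ch.isdigit())
--         try:
--             height = int(digits) if digits else 0
--         except Exception:
--             height = 0
--         if height >= best_height:
--             best = rend
--             best_height = height
--     return best
-- ===== SOURCE B (Python) =====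
-- from typing import Any, Dict, List, Optional, Iterable
--
-- def _parsed_height(rend):
--     label = str(rend.get("name") or "")
--     digits = "".join(ch for ch in label if ch.isdigit())
--     try:
--         return int(digits) if digits else 0
--     except Exception:
--         return 0
--
-- def _select_trickplay_source(renditions):
--     items = sorted(renditions or [], key=_parsed_height)
--     return items[-1] if items else None
-- ===== Notes on version B (the rewrite author's own statement) =====
-- stated objective: alternative
-- what changed: Replaces the running-max loop with explicit best/best_height state by a stable sort on parsed height followed by taking the last element; stability reproduces the >=-tie-to-last rule.
import Mathlib
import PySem

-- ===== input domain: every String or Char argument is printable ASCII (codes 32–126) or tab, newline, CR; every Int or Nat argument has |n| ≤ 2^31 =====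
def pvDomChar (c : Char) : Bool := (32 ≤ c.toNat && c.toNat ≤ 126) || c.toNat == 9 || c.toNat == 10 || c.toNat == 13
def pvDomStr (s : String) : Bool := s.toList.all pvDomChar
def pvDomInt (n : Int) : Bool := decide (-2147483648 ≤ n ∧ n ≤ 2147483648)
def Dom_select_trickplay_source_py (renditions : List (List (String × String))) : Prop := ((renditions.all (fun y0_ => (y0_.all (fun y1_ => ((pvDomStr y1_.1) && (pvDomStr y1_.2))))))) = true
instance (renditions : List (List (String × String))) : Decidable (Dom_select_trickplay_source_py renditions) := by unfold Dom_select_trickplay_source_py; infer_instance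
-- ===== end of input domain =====

-- B replaces A's running-max loop with explicit best/best_height state by a stable sort on the same parsed height followed by taking the last element (objective: alternative decomposition).

-- ===== PORT A =====
-- shared height parser: both Pythons contain this exact code (label = rend.get("name") or "", digits, int-or-0)
def pvHeight (rend : List (String × String)) : Int :=
  let label : String :=
    match PySem.Dict.get? (PySem.Dict.mk rend) "name" with
    | none => ""
    | some s => if s = "" then "" else s   -- `or ""`: an empty (falsy) string yields ""
  let digits : String := String.ofList (label.toList.filter PySem.Str.isdigit)
  if digits = "" then 0 else ((PySem.Int.ofStr? digits).getD 0)   -- try/except → 0 on ValueError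

def select_trickplay_source_py (renditions : List (List (String × String))) : Option (List (String × String)) :=
  (renditions.foldl
    (fun (st : Option (List (String × String)) × Int) rend =>
      let height := pvHeight rend
      if st.2 ≤ height then (some rend, height) else st)
    (none, -1)).1

-- ===== PORT B =====
def select_trickplay_source_py_alt (renditions : List (List (String × String))) : Option (List (String × String)) :=
  let items := PySem.List.sorted renditions pvHeight
  if items = [] then none else PySem.List.pyGet? items (-1)

-- ===== PRECONDITION & SPEC =====
def Spec_select_trickplay_source_py (renditions : List (List (String × String))) (out : Option (List (String × String))) : Prop := out = select_trickplay_source_py_alt renditions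
instance (renditions : List (List (String × String))) (out : Option (List (String × String))) : Decidable (Spec_select_trickplay_source_py renditions out) := by unfold Spec_select_trickplay_source_py; infer_instance

-- ===== CLAIM (what is proved, stated in full; the proofs are below) =====
def Claim_equal_select_trickplay_source_py : Prop := ∀ (renditions : List (List (String × String))), Dom_select_trickplay_source_py renditions → Spec_select_trickplay_source_py renditions (select_trickplay_source_py renditions)

-- ===== LEMMAS AND PROOFS =====

-- height of the last element of the sorted accumulator, -1 when it is empty (A's initial best_height)
def pvLastH (acc : List (List (String × String))) : Int :=
  match acc.getLast? with
  | none => -1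
  | some r => pvHeight r

lemma pv_dropWhile_space_of_digits (cs : List Char) (h : ∀ c ∈ cs, PySem.Str.isdigit c = true) :
    List.dropWhile PySem.Int.isIntSpace cs = cs := by
  rw [List.dropWhile_eq_self_iff]
  intro hl
  have hd := h cs[0] (List.getElem_mem hl)
  simp only [PySem.Int.isIntSpace, Bool.or_eq_true, decide_eq_true_eq, not_or]
  refine ⟨⟨⟨⟨⟨?_, ?_⟩, ?_⟩, ?_⟩, ?_⟩, ?_⟩ <;>
    (intro he; rw [he] at hd; revert hd; decide)

lemma pv_ofChars?_digits_nonneg (cs : List Char) (h : ∀ c ∈ cs, PySem.Str.isdigit c = true)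
    {n : Int} (hn : PySem.Int.ofChars? cs = some n) : 0 ≤ n := by
  unfold PySem.Int.ofChars? at hn
  dsimp only at hn
  rw [pv_dropWhile_space_of_digits cs h] at hn
  rw [pv_dropWhile_space_of_digits cs.reverse (by intro c hc; exact h c (List.mem_reverse.mp hc)),
      List.reverse_reverse] at hn
  split at hn
  · exact absurd (h '-' List.mem_cons_self) (by decide)
  · exact absurd (h '+' List.mem_cons_self) (by decide)
  · simp only [Option.map_eq_some_iff, Option.bind_eq_some_iff, Option.pure_def,
      Option.some.injEq, bind] at hn
    obtain ⟨m, ⟨a, _, rfl⟩, rfl⟩ := hn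
    positivity

lemma pv_if_digits_nonneg (label : String) :
    0 ≤ (if String.ofList (label.toList.filter PySem.Str.isdigit) = "" then (0 : Int)
         else ((PySem.Int.ofStr? (String.ofList (label.toList.filter PySem.Str.isdigit))).getD 0)) := by
  split
  · exact le_refl 0
  · cases hv : PySem.Int.ofStr? (String.ofList (label.toList.filter PySem.Str.isdigit)) with
    | none => simp
    | some n =>
      simp only [Option.getD_some]
      apply pv_ofChars?_digits_nonneg (label.toList.filter PySem.Str.isdigit)
      · intro c hc; exact (List.mem_filter.mp hc).2
      · rw [PySem.Int.ofStr?, String.toList_ofList] at hv; exact hv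

lemma pvHeight_nonneg (rend : List (String × String)) : 0 ≤ pvHeight rend := by
  unfold pvHeight
  dsimp only
  exact pv_if_digits_nonneg _

lemma pv_getLast?_cons_of_ne_nil {α : Type} (y : α) (l : List α) (h : l ≠ []) :
    (y :: l).getLast? = l.getLast? := by
  cases l with
  | nil => exact absurd rfl h
  | cons z zs => exact List.getLast?_cons_cons

lemma pv_insertBy_pairwise (x : List (String × String)) (acc : List (List (String × String)))
    (h : acc.Pairwise (fun a b => pvHeight a ≤ pvHeight b)) :
    (PySem.List.insertBy (fun a b => decide (pvHeight a < pvHeight b)) x acc).Pairwise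
      (fun a b => pvHeight a ≤ pvHeight b) := by
  induction acc with
  | nil => simp [PySem.List.insertBy]
  | cons y ys ih =>
    rw [List.pairwise_cons] at h
    obtain ⟨hy, hys⟩ := h
    rw [PySem.List.insertBy]
    split
    · rename_i hlt
      simp only [decide_eq_true_eq] at hlt
      refine List.Pairwise.cons ?_ (List.Pairwise.cons hy hys)
      intro z hz
      rcases List.mem_cons.mp hz with rfl | hz
      · exact le_of_lt hlt
      · exact le_trans (le_of_lt hlt) (hy z hz)
    · rename_i hge
      simp only [decide_eq_true_eq, not_lt] at hge
      refine List.Pairwise.cons ?_ (ih hys)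
      intro z hz
      rcases (PySem.List.mem_insertBy _ _ _ _).mp hz with rfl | hz
      · exact hge
      · exact hy z hz

lemma pv_insertBy_getLast? (x : List (String × String)) (acc : List (List (String × String)))
    (h : acc.Pairwise (fun a b => pvHeight a ≤ pvHeight b)) :
    (PySem.List.insertBy (fun a b => decide (pvHeight a < pvHeight b)) x acc).getLast?
      = if pvLastH acc ≤ pvHeight x then some x else acc.getLast? := by
  induction acc with
  | nil =>
    have := pvHeight_nonneg x
    rw [PySem.List.insertBy, if_pos (by unfold pvLastH; simp; omega)]
    rfl
  | cons y ys ih =>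
    rw [List.pairwise_cons] at h
    obtain ⟨hy, hys⟩ := h
    rw [PySem.List.insertBy]
    split
    · rename_i hlt
      simp only [decide_eq_true_eq] at hlt
      have hlast : pvHeight x < pvLastH (y :: ys) := by
        unfold pvLastH
        cases hys' : (y :: ys).getLast? with
        | none => simp at hys'
        | some r =>
          have hr : r ∈ y :: ys := List.mem_of_getLast? hys'
          rcases List.mem_cons.mp hr with rfl | hr
          · exact hlt
          · exact lt_of_lt_of_le hlt (hy r hr)
      rw [if_neg (by omega), List.getLast?_cons_cons]
    · rename_i hge
      simp only [decide_eq_true_eq, not_lt] at hge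
      have hne : PySem.List.insertBy (fun a b => decide (pvHeight a < pvHeight b)) x ys ≠ [] := by
        cases ys with
        | nil => rw [PySem.List.insertBy]; simp
        | cons a b => rw [PySem.List.insertBy]; split <;> simp
      rw [pv_getLast?_cons_of_ne_nil _ _ hne, ih hys]
      cases ys with
      | nil =>
        have hxnn := pvHeight_nonneg x
        have h1 : pvLastH [] = -1 := rfl
        have h2 : pvLastH [y] = pvHeight y := rfl
        rw [h1, h2, if_pos (by omega), if_pos hge]
      | cons z zs =>
        have hLH : pvLastH (y :: z :: zs) = pvLastH (z :: zs) := by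
          unfold pvLastH; rw [List.getLast?_cons_cons]
        rw [hLH]
        split
        · rfl
        · exact (List.getLast?_cons_cons).symm

lemma pvLastH_congr (l l' : List (List (String × String))) (h : l.getLast? = l'.getLast?) :
    pvLastH l = pvLastH l' := by
  unfold pvLastH; rw [h]

lemma pv_main (xs : List (List (String × String))) (acc : List (List (String × String)))
    (h : acc.Pairwise (fun a b => pvHeight a ≤ pvHeight b)) :
    (xs.foldl
      (fun (st : Option (List (String × String)) × Int) rend =>
        let height := pvHeight rend
        if st.2 ≤ height then (some rend, height) else st)
      (acc.getLast?, pvLastH acc)).1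
    = (xs.foldl (fun a x => PySem.List.insertBy (fun a b => decide (pvHeight a < pvHeight b)) x a) acc).getLast? := by
  induction xs generalizing acc with
  | nil => simp
  | cons x rest ih =>
    simp only [List.foldl_cons]
    have hstep :
        (let height := pvHeight x;
         if pvLastH acc ≤ height then (some x, height) else (acc.getLast?, pvLastH acc))
        = ((PySem.List.insertBy (fun a b => decide (pvHeight a < pvHeight b)) x acc).getLast?,
           pvLastH (PySem.List.insertBy (fun a b => decide (pvHeight a < pvHeight b)) x acc)) := by
      have hlast := pv_insertBy_getLast? x acc h
      by_cases hle : pvLastH acc ≤ pvHeight x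
      · rw [if_pos hle] at hlast
        dsimp only
        rw [if_pos hle, hlast]
        have hh : pvLastH (PySem.List.insertBy (fun a b => decide (pvHeight a < pvHeight b)) x acc)
            = pvHeight x := by unfold pvLastH; rw [hlast]
        rw [hh]
      · rw [if_neg hle] at hlast
        dsimp only
        rw [if_neg hle, hlast, pvLastH_congr _ acc hlast]
    rw [hstep]
    exact ih _ (pv_insertBy_pairwise x acc h)

-- ===== VERDICT (by name: the statement is the Claim_ definition above) =====
theorem select_trickplay_source_py_spec : Claim_equal_select_trickplay_source_py := by
  intro renditions _
  unfold Spec_select_trickplay_source_py select_trickplay_source_py select_trickplay_source_py_alt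
  dsimp only
  have hB : (if PySem.List.sorted renditions pvHeight = [] then none
      else PySem.List.pyGet? (PySem.List.sorted renditions pvHeight) (-1))
      = (PySem.List.sorted renditions pvHeight).getLast? := by
    split
    · rename_i he; rw [he]; rfl
    · exact PySem.List.pyGet?_neg_one _
  rw [hB, PySem.List.sorted_eq_foldl_insertBy]
  have hM := pv_main renditions [] List.Pairwise.nil
  simpa [pvLastH] using hM
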